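-- pv_equiv track=rewrite | github.com/Ascurius/Thesis | code/operators_plain.py | group_by_count
-- ===== SOURCE A (Python) =====
-- from typing import Callable, List, Tuple
--
-- def group_by_count(matrix: List[List[int]], key: int) -> List[List[int]]:
--     matrix.sort(key=lambda row: (row[key], row[2]))
--     result = [row + [0, 0] for row in matrix]
--
--     count = 0
--     current_element = None
--     for i in range(len(matrix) - 1):
--         if matrix[i][key] != current_element:
--             count = 1
--         else:
--             count += 1
--         current_element = matrix[i][key]
--         result[i][-2] = int(matrix[i][key] != matrix[i + 1][key])  # Relevancy column
--         result[i][-1] = count                                      # Count column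
--
--     result[-1][-2] = 1
--     if matrix[-1][key] == current_element:
--         result[-1][-1] = count + 1
--     else:
--         result[-1][-1] = 1
--     return result
-- ===== SOURCE B (Python) =====
-- from typing import List
--
-- def _annotate(run: List[List[int]]) -> List[List[int]]:
--     size = len(run)
--     return [row + [1 if pos == size else 0, pos] for pos, row in enumerate(run, 1)]
--
-- def group_by_count(matrix: List[List[int]], key: int) -> List[List[int]]:
--     matrix.sort(key=lambda row: (row[key], row[2]))
--     out = []
--     run = []
--     for row, nxt in zip(matrix, matrix[1:] + [None]):
--         run.append(row)
--         if nxt is None or nxt[key] != row[key]: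
--             out += _annotate(run)
--             run = []
--     return out
-- ===== Notes on version B (the rewrite author's own statement) =====
-- stated objective: alternative
-- what changed: A pre-builds the annotated rows and patches them through an indexed loop that threads a running count and previous-key state plus a separate last-row fixup; B makes one pass over (row, next-row) pairs, buffering the current equal-key run and emitting both columns (position-in-run and end-of-run flag) from the run itself at each boundary, with no index writes and no fixup.
-- outside the precondition, e.g. on group_by_count([], 0): A raises IndexError, B returns []
import Mathlib
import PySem

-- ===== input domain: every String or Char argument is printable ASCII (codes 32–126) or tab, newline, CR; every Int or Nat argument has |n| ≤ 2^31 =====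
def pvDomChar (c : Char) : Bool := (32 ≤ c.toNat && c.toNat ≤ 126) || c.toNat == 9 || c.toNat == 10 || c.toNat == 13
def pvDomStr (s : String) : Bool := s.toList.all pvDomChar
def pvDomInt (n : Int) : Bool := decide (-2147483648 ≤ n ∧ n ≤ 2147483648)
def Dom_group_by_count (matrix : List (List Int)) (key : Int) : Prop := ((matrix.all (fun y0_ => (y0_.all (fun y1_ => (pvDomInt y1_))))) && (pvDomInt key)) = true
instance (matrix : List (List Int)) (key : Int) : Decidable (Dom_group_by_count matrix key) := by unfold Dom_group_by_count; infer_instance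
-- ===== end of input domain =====

-- B replaces A's indexed patch-loop (running count + previous-key state + last-row fixup)
-- by a single run-buffering pass over (row, next-row) pairs; same return value; both
-- Pythons sort the argument in place identically (the equivalence proved is about the
-- return value).


-- ===== PORT A =====
-- matrix.sort(key=lambda row: (row[key], row[2])) — this line is shared verbatim by both Pythons
def pvSorted (matrix : List (List Int)) (key : Int) : List (List Int) :=
  PySem.List.sorted2 matrix (fun row => PySem.List.pyGetD row key 0)
    (fun row => PySem.List.pyGetD row 2 0)

-- the body of A's `for i in range(len(matrix) - 1)` loop, state (result, count, current_element)
def pvStepA (m : List (List Int)) (key : Int)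
    (st : List (List Int) × Int × Option Int) (i : Int) : List (List Int) × Int × Option Int :=
  let result := st.1
  let count := st.2.1
  let cur := st.2.2
  let count := if some (PySem.List.pyGetD (PySem.List.pyGetD m i []) key 0) ≠ cur then 1 else count + 1
  let cur := some (PySem.List.pyGetD (PySem.List.pyGetD m i []) key 0)
  -- result[i][-2] = int(matrix[i][key] != matrix[i+1][key])
  let result := PySem.List.pySetD result i
    (PySem.List.pySetD (PySem.List.pyGetD result i []) (-2)
      (if PySem.List.pyGetD (PySem.List.pyGetD m i []) key 0 ≠
          PySem.List.pyGetD (PySem.List.pyGetD m (i + 1) []) key 0 then 1 else 0))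
  -- result[i][-1] = count
  let result := PySem.List.pySetD result i
    (PySem.List.pySetD (PySem.List.pyGetD result i []) (-1) count)
  (result, count, cur)

-- A's last two statements: result[-1][-2] = 1; result[-1][-1] = count + 1 if matrix[-1][key] == current_element else 1
def pvFix (key : Int) (m : List (List Int)) (r : List (List Int) × Int × Option Int) : List (List Int) :=
  let result := PySem.List.pySetD r.1 (-1)
    (PySem.List.pySetD (PySem.List.pyGetD r.1 (-1) []) (-2) 1)
  PySem.List.pySetD result (-1)
    (PySem.List.pySetD (PySem.List.pyGetD result (-1) []) (-1)
      (if some (PySem.List.pyGetD (PySem.List.pyGetD m (-1) []) key 0) = r.2.2 then r.2.1 + 1 else 1))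

def group_by_count (matrix : List (List Int)) (key : Int) : List (List Int) :=
  let m := pvSorted matrix key
  let result := m.map (fun row => row ++ [0, 0])
  let st := (PySem.List.pyRange 0 ((m.length : Int) - 1) 1).foldl (pvStepA m key) (result, 0, none)
  pvFix key m st

-- ===== PORT B =====
-- _annotate(run): positions 1..len(run), end-of-run flag on the last position
def pvAnnotate (run : List (List Int)) : List (List Int) :=
  (PySem.List.enumerate run 1).map
    (fun p => p.2 ++ [if p.1 = (run.length : Int) then 1 else 0, p.1])

-- the body of B's `for row, nxt in zip(...)` loop, state (out, run)
def pvStepB (key : Int) (st : List (List Int) × List (List Int))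
    (p : List Int × Option (List Int)) : List (List Int) × List (List Int) :=
  let out := st.1
  let run := st.2 ++ [p.1]
  match p.2 with
  | none => (out ++ pvAnnotate run, [])
  | some nxt =>
      if PySem.List.pyGetD nxt key 0 ≠ PySem.List.pyGetD p.1 key 0 then
        (out ++ pvAnnotate run, [])
      else (out, run)

def group_by_count_alt (matrix : List (List Int)) (key : Int) : List (List Int) :=
  let m := pvSorted matrix key
  let st := (m.zip ((PySem.List.slice m (some 1) none).map some ++ [none])).foldl
    (pvStepB key) ([], [])
  st.1

-- ===== PRECONDITION & SPEC =====
-- Pre_ excludes exactly the inputs where the Python A raises: the empty matrix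
-- (IndexError at result[-1]) and matrices with a row on which row[key] or row[2]
-- raises IndexError inside the sort key.
def Pre_group_by_count (matrix : List (List Int)) (key : Int) : Prop :=
  matrix ≠ [] ∧ ∀ row ∈ matrix,
    PySem.Raise.InRange row.length key ∧ PySem.Raise.InRange row.length 2
instance (matrix : List (List Int)) (key : Int) : Decidable (Pre_group_by_count matrix key) := by
  unfold Pre_group_by_count; infer_instance

def pvWitness_group_by_count : List (List Int) × Int := ([[1, 2, 3], [1, 5, 0]], 0)

def Spec_group_by_count (matrix : List (List Int)) (key : Int) (out : List (List Int)) : Prop :=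
  out = group_by_count_alt matrix key
instance (matrix : List (List Int)) (key : Int) (out : List (List Int)) : Decidable (Spec_group_by_count matrix key out) := by
  unfold Spec_group_by_count; infer_instance

-- ===== CLAIM (what is proved, stated in full; the proofs are below) =====
def Claim_equal_group_by_count : Prop := ∀ (matrix : List (List Int)) (key : Int), Dom_group_by_count matrix key → Pre_group_by_count matrix key → Spec_group_by_count matrix key (group_by_count matrix key)

-- ===== LEMMAS AND PROOFS =====

-- row[key] as a total function (faithful under Pre_)
def pvKey (key : Int) (row : List Int) : Int := PySem.List.pyGetD row key 0

-- A's loop, written as a structural recursion with one-step lookahead; leaves the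
-- last row unannotated (A's loop runs to len-1) and returns the final (count, cur)
def pvH (key count : Int) (cur : Option Int) : List (List Int) → List (List Int) × Int × Option Int
  | [] => ([], count, cur)
  | [x] => ([x ++ [0, 0]], count, cur)
  | x :: y :: t =>
      let c := if some (pvKey key x) ≠ cur then 1 else count + 1
      let r := pvH key c (some (pvKey key x)) (y :: t)
      ((x ++ [if pvKey key x ≠ pvKey key y then 1 else 0, c]) :: r.1, r.2)

-- A's loop with its last-row fixup folded in
def pvA (key count : Int) (cur : Option Int) : List (List Int) → List (List Int)
  | [] => []
  | [x] => [x ++ [1, if some (pvKey key x) = cur then count + 1 else 1]]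
  | x :: y :: t =>
      let c := if some (pvKey key x) ≠ cur then 1 else count + 1
      (x ++ [if pvKey key x ≠ pvKey key y then 1 else 0, c]) :: pvA key c (some (pvKey key x)) (y :: t)

-- B's loop as a structural recursion with a run buffer
def pvB (key : Int) (run : List (List Int)) : List (List Int) → List (List Int)
  | [] => []
  | [x] => pvAnnotate (run ++ [x])
  | x :: y :: t =>
      if pvKey key y ≠ pvKey key x then pvAnnotate (run ++ [x]) ++ pvB key [] (y :: t)
      else pvB key (run ++ [x]) (y :: t)

-- zip(matrix, matrix[1:] + [None]) as a structural recursion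
def pvZN : List (List Int) → List (List Int × Option (List Int))
  | [] => []
  | [x] => [(x, none)]
  | x :: y :: t => (x, some y) :: pvZN (y :: t)

-- pvAnnotate with a shifted enumeration start and an explicit size
def pvAnnFrom (c size : Int) (run : List (List Int)) : List (List Int) :=
  (PySem.List.enumerate run (c + 1)).map (fun p => p.2 ++ [if p.1 = size then 1 else 0, p.1])

-- small pySetD/pyGetD facts -----------------------------------------------------
lemma pv_set_neg2 {α : Type} (row : List α) (a b v : α) :
    PySem.List.pySetD (row ++ [a, b]) (-2) v = row ++ [v, b] := by
  simp [PySem.List.pySetD, PySem.List.pySet?, PySem.List.pyIdx?]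

lemma pv_set_inner_neg1 {α : Type} (row : List α) (a b v : α) :
    PySem.List.pySetD (row ++ [a, b]) (-1) v = row ++ [a, v] := by
  simp [PySem.List.pySetD, PySem.List.pySet?, PySem.List.pyIdx?]

lemma pv_getD_append_length {α : Type} (pre l : List α) (x d : α) :
    (pre ++ x :: l).getD pre.length d = x := by
  simp [List.getD]

lemma pv_set_append_length {α : Type} (pre l : List α) (x v : α) :
    (pre ++ x :: l).set pre.length v = pre ++ v :: l := by
  induction pre with
  | nil => rfl
  | cons p ps ih => simp [ih]

lemma pv_setD_cons_neg_one {α : Type} (zs : List α) (z v : α) (h : zs ≠ []) :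
    PySem.List.pySetD (z :: zs) (-1) v = z :: PySem.List.pySetD zs (-1) v := by
  cases zs with
  | nil => exact absurd rfl h
  | cons a as => simp [PySem.List.pySetD, PySem.List.pySet?, PySem.List.pyIdx?]

lemma pv_getD_cons_neg_one {α : Type} (zs : List α) (z d : α) (h : zs ≠ []) :
    PySem.List.pyGetD (z :: zs) (-1) d = PySem.List.pyGetD zs (-1) d := by
  rw [PySem.List.pyGetD_neg_one _ _ h, PySem.List.pyGetD_neg_one _ _ (by simp)]
  exact List.getLast_cons h

lemma pv_setD_singleton_neg_one {α : Type} (z v : α) :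
    PySem.List.pySetD [z] (-1) v = [v] := by
  simp [PySem.List.pySetD, PySem.List.pySet?, PySem.List.pyIdx?]

lemma pv_getD_singleton_neg_one {α : Type} (z d : α) :
    PySem.List.pyGetD [z] (-1) d = z := by
  rw [PySem.List.pyGetD_neg_one _ _ (by simp)]
  rfl

lemma pvAnnFrom_cons (c size : Int) (x : List Int) (run : List (List Int)) :
    pvAnnFrom c size (x :: run) =
      (x ++ [if c + 1 = size then 1 else 0, c + 1]) :: pvAnnFrom (c + 1) size run := by
  simp [pvAnnFrom, PySem.List.enumerate_cons]

lemma pvAnnFrom_zero (run : List (List Int)) :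
    pvAnnFrom 0 (run.length : Int) run = pvAnnotate run := by
  norm_num [pvAnnFrom, pvAnnotate]

-- the A-side loop characterisation ---------------------------------------------
lemma pvH_ne_nil (key count : Int) (cur : Option Int) (m : List (List Int)) (h : m ≠ []) :
    (pvH key count cur m).1 ≠ [] := by
  match m with
  | [] => exact absurd rfl h
  | [x] => simp [pvH]
  | x :: y :: t => simp [pvH]

lemma pv_foldA (key : Int) :
    ∀ (suf pre done : List (List Int)) (count : Int) (cur : Option Int),
      done.length = pre.length → suf ≠ [] →
      (PySem.List.pyRange (pre.length : Int) (((pre.length + suf.length : Nat) : Int) - 1) 1).foldl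
          (pvStepA (pre ++ suf) key) (done ++ suf.map (fun row => row ++ [0, 0]), count, cur)
        = (done ++ (pvH key count cur suf).1, (pvH key count cur suf).2) := by
  intro suf
  match suf with
  | [] => intro pre done count cur _ h; exact absurd rfl h
  | [x] =>
    intro pre done count cur hlen _
    rw [show (((pre.length + ([x] : List (List Int)).length : Nat) : Int) - 1) = (pre.length : Int) by
      push_cast; simp]
    rw [PySem.List.pyRange_one_eq_nil (le_refl _)]
    simp [pvH]
  | x :: y :: t =>
    intro pre done count cur hlen _
    have hab : (pre.length : Int) < ((pre.length + (x :: y :: t).length : Nat) : Int) - 1 := by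
      push_cast [List.length_cons]; omega
    rw [PySem.List.pyRange_one_cons hab, List.foldl_cons]
    have hg1 : PySem.List.pyGetD (pre ++ x :: y :: t) (pre.length : Int) [] = x := by
      rw [PySem.List.pyGetD_natCast]; exact pv_getD_append_length _ _ _ _
    have hg2 : PySem.List.pyGetD (pre ++ x :: y :: t) ((pre.length : Int) + 1) [] = y := by
      rw [show ((pre.length : Int) + 1) = (((pre ++ [x]).length : Nat) : Int) by simp]
      rw [PySem.List.pyGetD_natCast, show pre ++ x :: y :: t = (pre ++ [x]) ++ y :: t by simp]
      exact pv_getD_append_length _ _ _ _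
    simp only [pvStepA, hg1, hg2, List.map_cons]
    rw [← hlen, PySem.List.pyGetD_natCast, pv_getD_append_length]
    simp only [PySem.List.pySetD_natCast, pv_set_append_length, pv_set_neg2]
    rw [PySem.List.pyGetD_natCast, pv_getD_append_length, pv_set_inner_neg1]
    have ih := pv_foldA key (y :: t) (pre ++ [x])
      (done ++ [x ++ [if PySem.List.pyGetD x key 0 ≠ PySem.List.pyGetD y key 0 then 1 else 0,
        if some (PySem.List.pyGetD x key 0) ≠ cur then 1 else count + 1]])
      (if some (PySem.List.pyGetD x key 0) ≠ cur then 1 else count + 1)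
      (some (PySem.List.pyGetD x key 0)) (by simp [hlen]) (by simp)
    rw [show pre ++ x :: y :: t = (pre ++ [x]) ++ y :: t by simp]
    rw [show ((done.length : Int) + 1) = (((pre ++ [x]).length : Nat) : Int) by
      rw [hlen]; push_cast [List.length_append, List.length_cons, List.length_nil]; omega]
    rw [show ((done.length + (x :: y :: t).length : Nat) : Int) - 1
        = (((pre ++ [x]).length + (y :: t).length : Nat) : Int) - 1 by
      push_cast [List.length_cons, List.length_append, List.length_nil]; omega]
    rw [show done ++ (x ++ [if PySem.List.pyGetD x key 0 ≠ PySem.List.pyGetD y key 0 then 1 else 0,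
          if some (PySem.List.pyGetD x key 0) ≠ cur then 1 else count + 1]) ::
          (y ++ [0, 0]) :: List.map (fun row => row ++ [0, 0]) t
        = (done ++ [x ++ [if PySem.List.pyGetD x key 0 ≠ PySem.List.pyGetD y key 0 then 1 else 0,
          if some (PySem.List.pyGetD x key 0) ≠ cur then 1 else count + 1]])
          ++ List.map (fun row => row ++ [0, 0]) (y :: t) by simp]
    rw [ih]
    simp only [pvH, pvKey, List.append_assoc, List.cons_append, List.nil_append]
    rfl

lemma pv_fixA (key : Int) :
    ∀ (m : List (List Int)) (count : Int) (cur : Option Int), m ≠ [] →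
      pvFix key m (pvH key count cur m) = pvA key count cur m := by
  intro m
  match m with
  | [] => intro count cur h; exact absurd rfl h
  | [x] =>
    intro count cur _
    simp [pvFix, pvH, pvA, pv_getD_singleton_neg_one, pv_set_neg2, pv_set_inner_neg1,
      pv_setD_singleton_neg_one, pvKey]
  | x :: y :: t =>
    intro count cur _
    have ih := pv_fixA key (y :: t) (if some (pvKey key x) ≠ cur then 1 else count + 1)
      (some (pvKey key x)) (by simp)
    have hne : (pvH key (if some (pvKey key x) ≠ cur then 1 else count + 1)
        (some (pvKey key x)) (y :: t)).1 ≠ [] := pvH_ne_nil _ _ _ _ (by simp)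
    have hne2 : PySem.List.pySetD (pvH key (if some (pvKey key x) ≠ cur then 1 else count + 1)
        (some (pvKey key x)) (y :: t)).1 (-1)
        (PySem.List.pySetD (PySem.List.pyGetD (pvH key (if some (pvKey key x) ≠ cur then 1 else count + 1)
          (some (pvKey key x)) (y :: t)).1 (-1) []) (-2) 1) ≠ [] := by
      intro hc
      have h2 := congrArg List.length hc
      simp [PySem.List.length_pySetD] at h2
      exact pvH_ne_nil key _ _ _ (by simp) h2
    simp only [pvH, pvA]
    simp only [pvFix] at ih ⊢
    rw [pv_getD_cons_neg_one _ _ _ hne, pv_setD_cons_neg_one _ _ _ hne,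
        pv_getD_cons_neg_one _ _ _ hne2, pv_setD_cons_neg_one _ _ _ hne2,
        pv_getD_cons_neg_one (y :: t) x [] (by simp)]
    rw [ih]

-- run lemmas ---------------------------------------------------------------------
lemma pv_A_run (key κ : Int) :
    ∀ (run rest : List (List Int)) (count : Int),
      (∀ r ∈ run, pvKey key r = κ) →
      (∀ z w, rest = z :: w → pvKey key z ≠ κ) →
      pvA key count (some κ) (run ++ rest)
        = pvAnnFrom count (count + (run.length : Int)) run
            ++ pvA key (count + (run.length : Int)) (some κ) rest := by
  intro run
  induction run with
  | nil => intro rest count _ _; simp [pvAnnFrom]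
  | cons x run' ih =>
    intro rest count hmem hrest
    have hx : pvKey key x = κ := hmem x (by simp)
    match run', rest with
    | [], [] =>
      simp [pvA, pvAnnFrom, PySem.List.enumerate, hx]
    | [], z :: w =>
      have hz : pvKey key z ≠ κ := hrest z w rfl
      have h1 : ¬ (some (pvKey key x) ≠ some κ) := by rw [hx]; simp
      have h2 : pvKey key x ≠ pvKey key z := by rw [hx]; exact fun h => hz h.symm
      simp only [List.singleton_append, pvA, pvAnnFrom_cons]
      rw [if_neg h1, if_pos h2, hx]
      norm_num [pvAnnFrom, PySem.List.enumerate]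
    | x' :: run'', rest =>
      have hx' : pvKey key x' = κ := hmem x' (by simp)
      have h1 : ¬ (some (pvKey key x) ≠ some κ) := by rw [hx]; simp
      have h3 : ¬ (pvKey key x ≠ pvKey key x') := by rw [hx, hx']; simp
      have ihh := ih rest (count + 1) (fun r hr => hmem r (by simp [hr])) hrest
      simp only [List.cons_append, pvA, pvAnnFrom_cons] at ihh ⊢
      rw [if_neg h1, if_neg h3, hx]
      have hs : count + 1 + ((x' :: run'').length : Int) = count + ((x :: x' :: run'').length : Int) := by
        push_cast [List.length_cons]; ring
      rw [hs] at ihh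
      rw [ihh, if_neg (show ¬ (count + 1 = count + ((x :: x' :: run'').length : Int)) by push_cast [List.length_cons]; omega)]

lemma pv_A_run0 (key κ : Int) :
    ∀ (run rest : List (List Int)) (count : Int) (cur : Option Int),
      run ≠ [] → (∀ r ∈ run, pvKey key r = κ) → cur ≠ some κ →
      (∀ z w, rest = z :: w → pvKey key z ≠ κ) →
      pvA key count cur (run ++ rest)
        = pvAnnFrom 0 (run.length : Int) run ++ pvA key (run.length : Int) (some κ) rest := by
  intro run
  match run with
  | [] => intro rest count cur h; exact absurd rfl h
  | x :: run₁ =>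
    intro rest count cur _ hmem hcur hrest
    have hx : pvKey key x = κ := hmem x (by simp)
    have hc : some (pvKey key x) ≠ cur := by rw [hx]; exact fun h => hcur h.symm
    match run₁, rest with
    | [], [] =>
      simp only [pvA, List.singleton_append]
      rw [if_neg hc]
      norm_num [pvAnnFrom, PySem.List.enumerate, pvA]
    | [], z :: w =>
      have hz : pvKey key z ≠ κ := hrest z w rfl
      have h2 : pvKey key x ≠ pvKey key z := by rw [hx]; exact fun h => hz h.symm
      simp only [List.singleton_append, pvA]
      rw [if_pos hc, if_pos h2, hx]
      norm_num [pvAnnFrom, PySem.List.enumerate]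
    | x' :: run'', rest =>
      have hx' : pvKey key x' = κ := hmem x' (by simp)
      have h3 : ¬ (pvKey key x ≠ pvKey key x') := by rw [hx, hx']; simp
      have ihh := pv_A_run key κ (x' :: run'') rest 1 (fun r hr => hmem r (by simp [hr])) hrest
      simp only [List.cons_append, pvA, pvAnnFrom_cons] at ihh ⊢
      rw [if_pos hc, if_neg h3, hx]
      have hs : (1 : Int) + ((x' :: run'').length : Int) = ((x :: x' :: run'').length : Int) := by
        push_cast [List.length_cons]; ring
      rw [hs] at ihh
      rw [ihh]
      rw [if_neg (show ¬ ((0:Int) + 1 = ((x :: x' :: run'').length : Int)) by push_cast [List.length_cons]; omega)]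
      norm_num

lemma pv_B_run (key κ : Int) :
    ∀ (run buf rest : List (List Int)),
      run ≠ [] → (∀ r ∈ run, pvKey key r = κ) →
      (∀ z w, rest = z :: w → pvKey key z ≠ κ) →
      pvB key buf (run ++ rest) = pvAnnotate (buf ++ run) ++ pvB key [] rest := by
  intro run
  induction run with
  | nil => intro buf rest h; exact absurd rfl h
  | cons x run' ih =>
    intro buf rest _ hmem hrest
    have hx : pvKey key x = κ := hmem x (by simp)
    match run', rest with
    | [], [] => simp [pvB]
    | [], z :: w =>
      have hz : pvKey key z ≠ κ := hrest z w rfl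
      have hcond : pvKey key z ≠ pvKey key x := by rw [hx]; exact hz
      simp only [List.singleton_append, pvB]
      rw [if_pos hcond]
    | x' :: run'', rest =>
      have hx' : pvKey key x' = κ := hmem x' (by simp)
      have hcond : ¬ (pvKey key x' ≠ pvKey key x) := by rw [hx, hx']; simp
      simp only [List.cons_append, pvB]
      rw [if_neg hcond]
      have := ih (buf ++ [x]) rest (by simp) (fun r hr => hmem r (by simp [hr])) hrest
      simp only [List.cons_append] at this
      rw [this, List.append_assoc]
      simp

-- main: A's annotation equals B's run-buffered annotation -------------------------
lemma pv_main (key : Int) :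
    ∀ (n : Nat) (m : List (List Int)) (count : Int) (cur : Option Int),
      m.length ≤ n →
      (∀ x t, m = x :: t → cur ≠ some (pvKey key x)) →
      pvA key count cur m = pvB key [] m := by
  intro n
  induction n with
  | zero =>
    intro m count cur hlen _
    have h0 : m = [] := List.eq_nil_of_length_eq_zero (Nat.le_zero.mp hlen)
    subst h0; simp [pvA, pvB]
  | succ n ih =>
    intro m count cur hlen hcur
    match m with
    | [] => simp [pvA, pvB]
    | x :: t =>
      have hsplit : (x :: t).takeWhile (fun r => pvKey key r == pvKey key x)
          ++ (x :: t).dropWhile (fun r => pvKey key r == pvKey key x) = x :: t :=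
        List.takeWhile_append_dropWhile
      have htake : (x :: t).takeWhile (fun r => pvKey key r == pvKey key x)
          = x :: t.takeWhile (fun r => pvKey key r == pvKey key x) := by
        simp
      have hdrop : (x :: t).dropWhile (fun r => pvKey key r == pvKey key x)
          = t.dropWhile (fun r => pvKey key r == pvKey key x) := by
        simp
      have hmem : ∀ r ∈ (x :: t).takeWhile (fun r => pvKey key r == pvKey key x),
          pvKey key r = pvKey key x := fun r hr => by
        have := List.mem_takeWhile_imp hr; simpa using this
      have hrest : ∀ z w, (x :: t).dropWhile (fun r => pvKey key r == pvKey key x) = z :: w →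
          pvKey key z ≠ pvKey key x := by
        intro z w hzw
        have := List.head_dropWhile_not (fun r => pvKey key r == pvKey key x)
          (l := x :: t) (by simp [hzw])
        simpa [hzw] using this
      conv_lhs => rw [← hsplit]
      rw [pv_A_run0 key (pvKey key x) _ _ count cur (by simp [htake]) hmem (hcur x t rfl) hrest]
      conv_rhs => rw [← hsplit]
      rw [pv_B_run key (pvKey key x) _ [] _ (by simp [htake]) hmem hrest]
      simp only [List.nil_append]
      rw [pvAnnFrom_zero]
      congr 1
      apply ih
      · calc ((x :: t).dropWhile (fun r => pvKey key r == pvKey key x)).length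
            ≤ (t.dropWhile (fun r => pvKey key r == pvKey key x)).length := by rw [hdrop]
          _ ≤ t.length := List.length_dropWhile_le _ _
          _ ≤ n := by simpa using hlen
      · intro z w hzw h
        exact hrest z w hzw (by injection h with h'; exact h'.symm ▸ rfl)

-- B-side fold characterisation ----------------------------------------------------
lemma pv_zipNext (m : List (List Int)) :
    m.zip (m.tail.map some ++ [none]) = pvZN m := by
  match m with
  | [] => rfl
  | [x] => rfl
  | x :: y :: t =>
    have ih := pv_zipNext (y :: t)
    simpa [pvZN] using ih

lemma pv_foldB (key : Int) :
    ∀ (m : List (List Int)) (out run : List (List Int)),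
      ((pvZN m).foldl (pvStepB key) (out, run)).1 = out ++ pvB key run m := by
  intro m
  induction m with
  | nil => intro out run; simp [pvZN, pvB]
  | cons x t ih =>
    intro out run
    match t with
    | [] => simp [pvZN, pvB, pvStepB]
    | y :: t' =>
      simp only [pvZN, List.foldl_cons]
      rw [ih]
      by_cases hk : pvKey key y ≠ pvKey key x
      · simp [pvStepB, pvB, pvKey] at hk ⊢
        simp [hk, List.append_assoc]
      · simp [pvStepB, pvB, pvKey] at hk ⊢
        simp [hk]

-- ===== VERDICT (by name: the statement is the Claim_ definition above) =====
theorem group_by_count_spec : Claim_equal_group_by_count := by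
  intro matrix key _ hpre
  unfold Spec_group_by_count
  have hmne : pvSorted matrix key ≠ [] := by
    intro h
    have hperm := PySem.List.sorted2_perm matrix
      (fun row => PySem.List.pyGetD row key 0) (fun row => PySem.List.pyGetD row 2 0) false
    rw [show PySem.List.sorted2 matrix (fun row => PySem.List.pyGetD row key 0)
        (fun row => PySem.List.pyGetD row 2 0) false = pvSorted matrix key from rfl, h] at hperm
    exact hpre.1 hperm.symm.eq_nil
  have hfold := pv_foldA key (pvSorted matrix key) [] [] 0 none rfl hmne
  simp only [List.length_nil, Nat.zero_add, Nat.cast_zero, List.nil_append] at hfold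
  have hfix := pv_fixA key (pvSorted matrix key) 0 none hmne
  have hmain := pv_main key (pvSorted matrix key).length (pvSorted matrix key) 0 none (le_refl _)
    (by intro x t _ h; simp at h)
  have hB := pv_foldB key (pvSorted matrix key) [] []
  show pvFix key (pvSorted matrix key)
      (List.foldl (pvStepA (pvSorted matrix key) key)
        (List.map (fun row => row ++ [0, 0]) (pvSorted matrix key), 0, none)
        (PySem.List.pyRange 0 ((((pvSorted matrix key).length : Nat) : Int) - 1) 1))
    = (List.foldl (pvStepB key) ([], [])
        ((pvSorted matrix key).zip
          (List.map some (PySem.List.slice (pvSorted matrix key) (some 1) none) ++ [none]))).1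
  rw [PySem.List.slice_from_one, pv_zipNext, hB, hfold]
  simp only [List.nil_append]
  rw [show ((pvH key 0 none (pvSorted matrix key)).1, (pvH key 0 none (pvSorted matrix key)).2)
      = pvH key 0 none (pvSorted matrix key) from rfl]
  rw [hfix, hmain]
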